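-- pv_equiv track=rewrite | github.com/Rularia/Translator-key-value | app.py | _parse_numbered_blocks
-- ===== SOURCE A (Python) =====
-- def _parse_numbered_blocks(text: str) -> dict[str, str]:
--     lines = text.splitlines()
--     results: dict[str, str] = {}
--     current_id: str | None = None
--     current_lines: list[str] = []
--     for raw_line in lines:
--         line = raw_line.rstrip("\r")
--         stripped = line.strip()
--         if stripped.startswith("[") and "]" in stripped:
--             block_id = stripped.split("]", 1)[0][1:].strip()
--             if block_id:
--                 if current_id is not None:
--                     results[current_id] = "\n".join(current_lines).strip()
--                 current_id = block_id
--                 current_lines = []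
--                 remainder = stripped.split("]", 1)[1].lstrip()
--                 if remainder:
--                     current_lines.append(remainder)
--                 continue
--         if current_id is not None:
--             current_lines.append(line)
--     if current_id is not None:
--         results[current_id] = "\n".join(current_lines).strip()
--     return results
-- ===== SOURCE B (Python) =====
-- def _parse_numbered_blocks(text: str) -> dict[str, str]:
--     def header(line):
--         s = line.strip()
--         if s.startswith("[") and "]" in s:
--             left, right = s.split("]", 1)
--             bid = left[1:].strip()
--             if bid:
--                 return bid, right.lstrip()
--         return None
--
--     lines = [ln.rstrip("\r") for ln in text.splitlines()]
--     blocks, tail = [], []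
--     # scan bottom-up: collect content lines in `tail` until a header is met,
--     # then seal them (plus the header's remainder) into that header's block
--     for line in reversed(lines):
--         h = header(line)
--         if h is None:
--             tail = [line] + tail
--         else:
--             blocks = [(h[0], ([h[1]] if h[1] else []) + tail)] + blocks
--             tail = []
--     result = {}
--     for bid, body in blocks:
--         result[bid] = "\n".join(body).strip()
--     return result
-- ===== Notes on version B (the rewrite author's own statement) =====
-- stated objective: alternative
-- what changed: A is a forward single-pass state machine that flushes the current block into the dict whenever the next header arrives; B scans the lines bottom-up, sealing each block's content lines at its header into an explicit (id, body) block list, and builds the dict in a separate final pass.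
import Mathlib
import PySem

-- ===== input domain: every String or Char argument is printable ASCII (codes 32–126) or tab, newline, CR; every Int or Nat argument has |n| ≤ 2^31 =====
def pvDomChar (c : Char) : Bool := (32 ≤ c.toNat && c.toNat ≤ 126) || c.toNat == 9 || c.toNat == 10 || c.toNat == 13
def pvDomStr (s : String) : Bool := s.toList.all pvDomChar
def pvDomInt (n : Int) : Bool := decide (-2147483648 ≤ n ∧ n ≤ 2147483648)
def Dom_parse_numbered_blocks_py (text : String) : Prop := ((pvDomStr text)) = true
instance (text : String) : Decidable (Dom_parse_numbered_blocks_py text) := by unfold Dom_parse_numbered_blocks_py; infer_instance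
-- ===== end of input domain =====

-- B re-parses the text bottom-up (reverse scan collecting each block's tail before its header)
-- and only then builds the dict in one separate pass — an alternative decomposition of A's
-- forward state machine; equivalence of the two is proved for every input.

-- ===== PORT A =====
-- hand port of s.rstrip("\r"): drop trailing '\r' characters (exact: rstrip with a char set of one char)
def pvRstripCR (s : String) : String :=
  String.ofList ((s.toList.reverse.dropWhile (· == '\r')).reverse)

-- the body of A's for-loop; state = (results, current_id, current_lines)
def pvStepA (st : PySem.Dict String String × Option String × List String)
    (raw_line : String) : PySem.Dict String String × Option String × List String :=
  let line := pvRstripCR raw_line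
  let stripped := PySem.Str.strip line
  if PySem.Str.startswith stripped "[" && PySem.Str.isIn "]" stripped then
    let parts := (PySem.Str.splitMax? stripped "]" 1).getD []   -- sep "]" ≠ "": never none
    let block_id := PySem.Str.strip (PySem.Str.slice ((PySem.List.pyGet? parts 0).getD "") (some 1) none)
    if block_id ≠ "" then
      let results := match st.2.1 with
        | some cid => st.1.insert cid (PySem.Str.strip (PySem.Str.join "\n" st.2.2))
        | none => st.1
      let remainder := PySem.Str.lstrip ((PySem.List.pyGet? parts 1).getD "")
      (results, some block_id, if remainder ≠ "" then [remainder] else [])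
    else  -- falls through to the trailing append (Python's `continue` was not taken)
      match st.2.1 with
      | some _ => (st.1, st.2.1, st.2.2 ++ [line])
      | none => st
  else
    match st.2.1 with
    | some _ => (st.1, st.2.1, st.2.2 ++ [line])
    | none => st

def parse_numbered_blocks_py (text : String) : List (String × String) :=
  let lines := PySem.Str.splitlines text
  let st := lines.foldl pvStepA (PySem.Dict.empty, none, [])
  (match st.2.1 with
   | some cid => st.1.insert cid (PySem.Str.strip (PySem.Str.join "\n" st.2.2))
   | none => st.1).items

-- ===== PORT B =====
-- Source B's helper `header(line)`: some (id, remainder) iff the line is a real block header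
def pvHeaderOf? (line : String) : Option (String × String) :=
  let s := PySem.Str.strip line
  if PySem.Str.startswith s "[" && PySem.Str.isIn "]" s then
    let parts := (PySem.Str.splitMax? s "]" 1).getD []   -- sep "]" ≠ "": never none
    let bid := PySem.Str.strip (PySem.Str.slice ((PySem.List.pyGet? parts 0).getD "") (some 1) none)
    if bid ≠ "" then some (bid, PySem.Str.lstrip ((PySem.List.pyGet? parts 1).getD ""))
    else none
  else none

-- the body of Source B's reversed for-loop; foldr = iteration over reversed(lines)
def pvStepB (line : String) (bt : List (String × List String) × List String) :
    List (String × List String) × List String :=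
  match pvHeaderOf? line with
  | none => (bt.1, line :: bt.2)
  | some h => ((h.1, (if h.2 ≠ "" then [h.2] else []) ++ bt.2) :: bt.1, [])

def parse_numbered_blocks_py_alt (text : String) : List (String × String) :=
  let lines := (PySem.Str.splitlines text).map pvRstripCR
  let bt := lines.foldr pvStepB ([], [])
  (bt.1.foldl
    (fun (d : PySem.Dict String String) b =>
      d.insert b.1 (PySem.Str.strip (PySem.Str.join "\n" b.2)))
    PySem.Dict.empty).items

-- ===== PRECONDITION & SPEC =====
def Spec_parse_numbered_blocks_py (text : String) (out : List (String × String)) : Prop := out = parse_numbered_blocks_py_alt text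
instance (text : String) (out : List (String × String)) : Decidable (Spec_parse_numbered_blocks_py text out) := by unfold Spec_parse_numbered_blocks_py; infer_instance

-- ===== CLAIM (what is proved, stated in full; the proofs are below) =====
def Claim_equal_parse_numbered_blocks_py : Prop := ∀ (text : String), Dom_parse_numbered_blocks_py text → Spec_parse_numbered_blocks_py text (parse_numbered_blocks_py text)

-- ===== LEMMAS AND PROOFS =====

-- B's second pass (blocks → dict), used as the common normal form
def pvFlush (res : PySem.Dict String String) (bs : List (String × List String)) :
    PySem.Dict String String :=
  bs.foldl (fun d b => d.insert b.1 (PySem.Str.strip (PySem.Str.join "\n" b.2))) res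

-- A's current block, as the block list it still owes
def pvSeed (cid : Option String) (cls : List String)
    (bt : List (String × List String) × List String) : List (String × List String) :=
  match cid with
  | some c => (c, cls ++ bt.2) :: bt.1
  | none => bt.1

-- A's step, re-expressed through B's header classifier (same tests, same pieces)
theorem pvStepA_eq (res : PySem.Dict String String) (cid : Option String)
    (cls : List String) (raw : String) :
    pvStepA (res, cid, cls) raw =
      match pvHeaderOf? (pvRstripCR raw) with
      | some h =>
          ((match cid with
            | some c => res.insert c (PySem.Str.strip (PySem.Str.join "\n" cls))
            | none => res),
           some h.1, if h.2 ≠ "" then [h.2] else [])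
      | none =>
          match cid with
          | some _ => (res, cid, cls ++ [pvRstripCR raw])
          | none => (res, cid, cls) := by
  unfold pvStepA pvHeaderOf?
  by_cases h1 : (PySem.Str.startswith (PySem.Str.strip (pvRstripCR raw)) "[" && PySem.Str.isIn "]" (PySem.Str.strip (pvRstripCR raw))) = true
  · rw [if_pos h1, if_pos h1]
    by_cases h2 : PySem.Str.strip (PySem.Str.slice ((PySem.List.pyGet? ((PySem.Str.splitMax? (PySem.Str.strip (pvRstripCR raw)) "]" 1).getD []) 0).getD "") (some 1) none) ≠ ""
    · rw [if_pos h2, if_pos h2]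
    · rw [if_neg h2, if_neg h2]
  · rw [if_neg h1, if_neg h1]

-- the loop invariant: A's forward run equals flushing B's backward-collected blocks
theorem pvMain (ls : List String) (res : PySem.Dict String String)
    (cid : Option String) (cls : List String) :
    (match (ls.foldl pvStepA (res, cid, cls)).2.1 with
     | some c => (ls.foldl pvStepA (res, cid, cls)).1.insert c
         (PySem.Str.strip (PySem.Str.join "\n" (ls.foldl pvStepA (res, cid, cls)).2.2))
     | none => (ls.foldl pvStepA (res, cid, cls)).1) =
    pvFlush res (pvSeed cid cls ((ls.map pvRstripCR).foldr pvStepB ([], []))) := by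
  induction ls generalizing res cid cls with
  | nil =>
      cases cid with
      | none => rfl
      | some c => simp [pvSeed, pvFlush]
  | cons l t ih =>
      simp only [List.foldl_cons, List.map_cons, List.foldr_cons, pvStepA_eq]
      rcases hh : pvHeaderOf? (pvRstripCR l) with _ | ⟨bid, rem⟩
      · cases cid with
        | none =>
            simp only [ih, pvSeed, pvStepB, hh]
        | some c =>
            simp only [ih, pvSeed, pvStepB, hh, List.append_assoc, List.singleton_append]
      · cases cid with
        | none =>
            simp only [ih, pvSeed, pvStepB, hh, pvFlush]
        | some c =>
            simp only [ih, pvSeed, pvStepB, hh, pvFlush, List.append_nil, List.foldl_cons]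

-- ===== VERDICT (by name: the statement is the Claim_ definition above) =====
theorem parse_numbered_blocks_py_spec : Claim_equal_parse_numbered_blocks_py := by
  intro text _
  unfold Spec_parse_numbered_blocks_py parse_numbered_blocks_py parse_numbered_blocks_py_alt
  have := pvMain (PySem.Str.splitlines text) PySem.Dict.empty none []
  simp only [pvSeed] at this
  simp only [this, pvFlush]
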